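-- pv_equiv track=rewrite | github.com/rekiemzi350-alt/Linguistic_Topology | analyze_waveforms.py | to_waveform
-- ===== SOURCE A (Python) =====
-- def to_waveform(path):
--     """Converts a path [n0, n1, n2...] into peaks/valleys [n0, -n1, n2, -n3...]"""
--     wave = []
--     for i, val in enumerate(path):
--         if i % 2 == 0:
--             wave.append(val)  # Peak
--         else:
--             wave.append(-val) # Valley
--     return wave
-- ===== SOURCE B (Python) =====
-- def to_waveform(path):
--     """Converts a path [n0, n1, n2...] into peaks/valleys [n0, -n1, n2, -n3...]"""
--     wave = list(path)
--     wave[1::2] = [-x for x in wave[1::2]]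
--     return wave
-- ===== Notes on version B (the rewrite author's own statement) =====
-- stated objective: idiomatic
-- what changed: Replaces the parity-branch enumerate loop building a new list with a copy-then-fixup two-phase structure: copy the input, then negate exactly the odd-indexed elements via one strided slice assignment wave[1::2].
import Mathlib
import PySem

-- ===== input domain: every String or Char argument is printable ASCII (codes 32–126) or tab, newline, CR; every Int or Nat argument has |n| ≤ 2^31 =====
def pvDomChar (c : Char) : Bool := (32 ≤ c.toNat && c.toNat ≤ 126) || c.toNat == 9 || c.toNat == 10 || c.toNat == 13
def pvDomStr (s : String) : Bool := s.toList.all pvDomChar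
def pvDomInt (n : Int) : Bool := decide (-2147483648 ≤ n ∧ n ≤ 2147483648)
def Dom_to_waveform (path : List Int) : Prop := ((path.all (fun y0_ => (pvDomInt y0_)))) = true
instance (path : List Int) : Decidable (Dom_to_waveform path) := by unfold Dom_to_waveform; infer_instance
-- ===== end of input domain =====

-- B copies the input and then negates only the odd-indexed elements through one
-- strided slice assignment wave[1::2] (idiomatic two-phase copy-then-fixup, no parity branch).

-- ===== PORT A =====
-- enumerate loop: state is (index, wave); branch on i % 2, append val or -val
def to_waveform (path : List Int) : List Int :=
  (path.foldl
    (fun (st : Nat × List Int) val =>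
      if st.1 % 2 == 0 then (st.1 + 1, st.2 ++ [val]) else (st.1 + 1, st.2 ++ [-val]))
    (0, [])).2

-- ===== PORT B =====
-- xs[1::2]: the odd-indexed elements (strided slice read; PySem has no step-2 slice,
-- ported by hand: exact for step 2 starting at 1)
def oddSlice : List Int → List Int
  | [] => []
  | [_] => []
  | _ :: b :: rest => b :: oddSlice rest

-- wave[1::2] = ys: write ys back into the odd positions of the copy (strided slice
-- assignment of a same-length list; ported by hand, exact for step 2 starting at 1)
def assignOdd : List Int → List Int → List Int
  | [], _ => []
  | [a], _ => [a]
  | a :: b :: rest, [] => a :: b :: rest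
  | a :: _ :: rest, y :: ys => a :: y :: assignOdd rest ys

def to_waveform_alt (path : List Int) : List Int :=
  let wave := path
  assignOdd wave ((oddSlice wave).map (fun x => -x))

-- ===== PRECONDITION & SPEC =====
def Spec_to_waveform (path : List Int) (out : List Int) : Prop := out = to_waveform_alt path
instance (path : List Int) (out : List Int) : Decidable (Spec_to_waveform path out) := by unfold Spec_to_waveform; infer_instance

-- ===== CLAIM (what is proved, stated in full; the proofs are below) =====
def Claim_equal_to_waveform : Prop := ∀ (path : List Int), Dom_to_waveform path → Spec_to_waveform path (to_waveform path)

-- ===== LEMMAS AND PROOFS =====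

-- pure functional description of A's loop body, starting at index i
def waveFrom (i : Nat) : List Int → List Int
  | [] => []
  | v :: vs => (if i % 2 == 0 then v else -v) :: waveFrom (i + 1) vs

lemma foldl_eq_waveFrom (path : List Int) :
    ∀ (i : Nat) (wave : List Int),
      (path.foldl
        (fun (st : Nat × List Int) val =>
          if st.1 % 2 == 0 then (st.1 + 1, st.2 ++ [val]) else (st.1 + 1, st.2 ++ [-val]))
        (i, wave)).2 = wave ++ waveFrom i path := by
  induction path with
  | nil => intro i wave; simp [waveFrom]
  | cons v vs ih =>
      intro i wave
      by_cases h : i % 2 = 0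
      · rw [List.foldl_cons, if_pos (by simpa using h), ih, waveFrom]
        simp [h]
      · rw [List.foldl_cons, if_neg (by simpa using h), ih, waveFrom]
        simp [h]

lemma waveFrom_add_two (xs : List Int) : ∀ i, waveFrom (i + 2) xs = waveFrom i xs := by
  induction xs with
  | nil => intro i; rfl
  | cons v vs ih =>
      intro i
      have h2 : (i + 2) % 2 = i % 2 := by omega
      simp [waveFrom, h2, ih (i + 1)]

lemma waveFrom_zero_eq_alt : (path : List Int) → waveFrom 0 path = to_waveform_alt path
  | [] => rfl
  | [a] => by simp [waveFrom, to_waveform_alt, oddSlice, assignOdd]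
  | a :: b :: rest => by
      have ih := waveFrom_zero_eq_alt rest
      have h2 : waveFrom 2 rest = waveFrom 0 rest := waveFrom_add_two rest 0
      simp only [waveFrom, to_waveform_alt, oddSlice, List.map_cons, assignOdd, h2] at *
      simp [ih]

-- ===== VERDICT (by name: the statement is the Claim_ definition above) =====
theorem to_waveform_spec : Claim_equal_to_waveform := by
  intro path _
  unfold Spec_to_waveform to_waveform
  rw [foldl_eq_waveFrom path 0 []]
  simpa using waveFrom_zero_eq_alt path
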